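-- pv_equiv track=rewrite | github.com/Haonan-Wang/Fuck-NJU-OJ | 路上的球.py | maxCnt
-- ===== SOURCE A (Python) =====
-- def maxCnt(road1, road2):
--     ans = 0
--     common = set(road1) & set(road2)
--     arr1 = []
--     arr2 = []
--     for num in sorted(common):
--         idx1 = road1.index(num)
--         idx2 = road2.index(num)
--         arr1.append(sum(road1[:idx1+1]))
--         arr2.append(sum(road2[:idx2+1]))
--         road1 = road1[idx1+1:]
--         road2 = road2[idx2+1:]
--     ans = max(sum(road1), sum(road2))
--     for val1,val2 in zip(arr1, arr2):
--         ans+=max(val1, val2)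
--     return ans
-- ===== SOURCE B (Python) =====
-- def maxCnt(road1, road2):
--     commons = sorted(set(road1) & set(road2))
--
--     def segments(road):
--         segs = []
--         run = 0
--         j = 0
--         for x in road:
--             run += x
--             if j < len(commons) and x == commons[j]:
--                 segs.append(run)
--                 run = 0
--                 j += 1
--         return segs, run
--
--     s1, t1 = segments(road1)
--     s2, t2 = segments(road2)
--     return max(t1, t2) + sum(map(max, s1, s2))
-- ===== Notes on version B (the rewrite author's own statement) =====
-- stated objective: faster
-- what changed: Instead of repeatedly calling list.index, slicing and re-summing suffixes for every common value (O(n*k)), B makes one pass over each road with a running sum and a pointer into the sorted common values, collecting segment sums directly (O(n + k log k)).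
import Mathlib
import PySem

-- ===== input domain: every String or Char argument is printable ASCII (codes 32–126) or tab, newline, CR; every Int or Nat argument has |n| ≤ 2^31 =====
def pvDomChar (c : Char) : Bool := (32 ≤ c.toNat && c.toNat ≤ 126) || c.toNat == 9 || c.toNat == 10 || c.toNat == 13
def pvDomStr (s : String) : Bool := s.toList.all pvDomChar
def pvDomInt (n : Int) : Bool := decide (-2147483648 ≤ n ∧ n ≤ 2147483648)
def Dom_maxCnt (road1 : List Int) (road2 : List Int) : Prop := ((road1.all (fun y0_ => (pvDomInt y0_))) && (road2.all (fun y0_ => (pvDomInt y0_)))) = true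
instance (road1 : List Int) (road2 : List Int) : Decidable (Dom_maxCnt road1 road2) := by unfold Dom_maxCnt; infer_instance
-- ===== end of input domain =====

-- B replaces A's repeated list.index / slice / re-sum passes by a single running-sum
-- pass per road against the sorted common values (objective: faster, asymptotic).

-- ===== PORT A =====
-- A's loop over sorted(common): state (arr1, arr2, road1, road2); 'none' models the
-- ValueError of list.index when the value is absent from the remaining suffix.
def maxCntGoA : List Int → List Int → List Int → List Int → List Int →
    Option (List Int × List Int × List Int × List Int)
  | [], arr1, arr2, r1, r2 => some (arr1, arr2, r1, r2)
  | num :: nums, arr1, arr2, r1, r2 =>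
    match PySem.List.index? r1 num, PySem.List.index? r2 num with
    | some i1, some i2 =>
        maxCntGoA nums
          (arr1 ++ [(PySem.List.slice r1 none (some ((i1 : Int) + 1))).sum])
          (arr2 ++ [(PySem.List.slice r2 none (some ((i2 : Int) + 1))).sum])
          (PySem.List.slice r1 (some ((i1 : Int) + 1)) none)
          (PySem.List.slice r2 (some ((i2 : Int) + 1)) none)
    | _, _ => none

def maxCnt (road1 : List Int) (road2 : List Int) : Int :=
  let common := PySem.Set.inter (PySem.Set.ofList road1) (PySem.Set.ofList road2)
  match maxCntGoA (PySem.List.sorted common (fun x => x) false) [] [] road1 road2 with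
  | none => 0  -- unreachable under Pre_maxCnt (Python raises ValueError here)
  | some (arr1, arr2, r1, r2) =>
    let ans := max r1.sum r2.sum
    (List.zip arr1 arr2).foldl (fun a (p : Int × Int) => a + max p.1 p.2) ans

-- ===== PORT B =====
-- Source B's inner loop: state (segs, run, remaining commons); the list of remaining
-- commons plays the role of the index j into the fixed commons list.
def segStep (st : List Int × Int × List Int) (x : Int) : List Int × Int × List Int :=
  let run := st.2.1 + x
  match st.2.2 with
  | c :: cs => if x = c then (st.1 ++ [run], 0, cs) else (st.1, run, c :: cs)
  | [] => (st.1, run, [])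

def segments (commons : List Int) (road : List Int) : List Int × Int :=
  let st := road.foldl segStep ([], 0, commons)
  (st.1, st.2.1)

def maxCnt_alt (road1 : List Int) (road2 : List Int) : Int :=
  let commons := PySem.List.sorted
    (PySem.Set.inter (PySem.Set.ofList road1) (PySem.Set.ofList road2)) (fun x => x) false
  let s1 := segments commons road1
  let s2 := segments commons road2
  max s1.2 s2.2 + (List.zipWith max s1.1 s2.1).sum

-- ===== PRECONDITION & SPEC =====
-- A raises ValueError iff the sorted common values are not a subsequence of both roads.
def Pre_maxCnt (road1 : List Int) (road2 : List Int) : Prop :=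
  let commons := PySem.List.sorted
    (PySem.Set.inter (PySem.Set.ofList road1) (PySem.Set.ofList road2)) (fun x => x) false
  commons.Sublist road1 ∧ commons.Sublist road2
instance (road1 : List Int) (road2 : List Int) : Decidable (Pre_maxCnt road1 road2) := by
  unfold Pre_maxCnt; infer_instance

def pvWitness_maxCnt : List Int × List Int := ([1, 2, 3], [3, 1, 2, 3])

def Spec_maxCnt (road1 : List Int) (road2 : List Int) (out : Int) : Prop := out = maxCnt_alt road1 road2
instance (road1 : List Int) (road2 : List Int) (out : Int) : Decidable (Spec_maxCnt road1 road2 out) := by unfold Spec_maxCnt; infer_instance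

-- ===== CLAIM (what is proved, stated in full; the proofs are below) =====
def Claim_equal_maxCnt : Prop := ∀ (road1 : List Int) (road2 : List Int), Dom_maxCnt road1 road2 → Pre_maxCnt road1 road2 → Spec_maxCnt road1 road2 (maxCnt road1 road2)

-- ===== LEMMAS AND PROOFS =====

-- Proof-side description of the segment sums (segF) and the leftover suffix (segR)
-- produced by A's greedy index/slice loop.
def segF : List Int → List Int → List Int
  | [], _ => []
  | c :: cs, road =>
    match PySem.List.index? road c with
    | some i => (road.take (i + 1)).sum :: segF cs (road.drop (i + 1))
    | none => []

def segR : List Int → List Int → List Int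
  | [], road => road
  | c :: cs, road =>
    match PySem.List.index? road c with
    | some i => segR cs (road.drop (i + 1))
    | none => road

theorem tail_sublist_of_not_mem_pre {c : Int} {cs pre suf : List Int}
    (h : (c :: cs).Sublist (pre ++ c :: suf)) (hc : c ∉ pre) :
    cs.Sublist suf := by
  induction pre with
  | nil => simpa using h
  | cons p pre ih =>
      simp only [List.mem_cons, not_or] at hc
      cases h with
      | cons _ h' => exact ih h' hc.2
      | cons₂ _ h' => exact absurd rfl hc.1

theorem sublist_drop_of_index? {c : Int} {cs road : List Int} {i : Nat}
    (h : (c :: cs).Sublist road) (hi : PySem.List.index? road c = some i) :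
    cs.Sublist (road.drop (i + 1)) := by
  rw [PySem.List.index?_eq_some_iff] at hi
  obtain ⟨pre, suf, rfl, hlen, hc⟩ := hi
  have hd : (pre ++ c :: suf).drop (i + 1) = suf := by
    rw [List.drop_append]; simp [hlen]
  rw [hd]; exact tail_sublist_of_not_mem_pre h hc

theorem slice_to_cast (r : List Int) (i : Nat) :
    PySem.List.slice r none (some ((i : Int) + 1)) = r.take (i + 1) := by
  have : ((i : Int) + 1) = ((i + 1 : Nat) : Int) := by push_cast; ring
  rw [this, PySem.List.slice_to_natCast]

theorem slice_from_cast (r : List Int) (i : Nat) :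
    PySem.List.slice r (some ((i : Int) + 1)) none = r.drop (i + 1) := by
  have : ((i : Int) + 1) = ((i + 1 : Nat) : Int) := by push_cast; ring
  rw [this, PySem.List.slice_from_natCast]

-- A's loop computes exactly the segF segment sums and the segR leftovers.
theorem goA_eq (cs : List Int) : ∀ (r1 r2 arr1 arr2 : List Int),
    cs.Sublist r1 → cs.Sublist r2 →
    maxCntGoA cs arr1 arr2 r1 r2 =
      some (arr1 ++ segF cs r1, arr2 ++ segF cs r2, segR cs r1, segR cs r2) := by
  induction cs with
  | nil => intro r1 r2 arr1 arr2 _ _; simp [maxCntGoA, segF, segR]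
  | cons c cs ih =>
      intro r1 r2 arr1 arr2 h1 h2
      have hm1 : c ∈ r1 := h1.subset (by simp)
      have hm2 : c ∈ r2 := h2.subset (by simp)
      obtain ⟨i1, hi1⟩ := Option.isSome_iff_exists.mp ((PySem.List.index?_isSome_iff r1 c).mpr hm1)
      obtain ⟨i2, hi2⟩ := Option.isSome_iff_exists.mp ((PySem.List.index?_isSome_iff r2 c).mpr hm2)
      have hs1 := sublist_drop_of_index? h1 hi1
      have hs2 := sublist_drop_of_index? h2 hi2
      simp only [maxCntGoA, hi1, hi2, slice_to_cast, slice_from_cast]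
      rw [ih _ _ _ _ hs1 hs2]
      have hj1 : List.idxOf? c r1 = some i1 := by rw [← PySem.List.index?_eq_idxOf?]; exact hi1
      have hj2 : List.idxOf? c r2 = some i2 := by rw [← PySem.List.index?_eq_idxOf?]; exact hi2
      simp [segF, segR, hj1, hj2]

def bump (r : Int) : List Int → List Int
  | [] => []
  | x :: xs => (r + x) :: xs

theorem bump_zero (l : List Int) : bump 0 l = l := by cases l <;> simp [bump]

theorem foldl_segStep_nil (road : List Int) : ∀ (segs : List Int) (run : Int),
    road.foldl segStep (segs, run, []) = (segs, run + road.sum, []) := by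
  induction road with
  | nil => intro segs run; simp
  | cons x road ih =>
      intro segs run
      simp only [List.foldl_cons, segStep]
      rw [ih]
      simp [add_assoc]

theorem foldl_segStep_pre (c : Int) (cs : List Int) (pre : List Int) :
    ∀ (segs : List Int) (run : Int), (∀ x ∈ pre, x ≠ c) →
    pre.foldl segStep (segs, run, c :: cs) = (segs, run + pre.sum, c :: cs) := by
  induction pre with
  | nil => intro segs run _; simp
  | cons p pre ih =>
      intro segs run hne
      have hp : p ≠ c := hne p (by simp)
      simp only [List.foldl_cons, segStep, if_neg hp]
      rw [ih _ _ (fun x hx => hne x (by simp [hx]))]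
      simp [add_assoc]

-- B's single pass produces the same segment sums and the leftover sum.
theorem foldl_segStep_eq (cs : List Int) : ∀ (road segs : List Int) (run : Int),
    cs.Sublist road →
    road.foldl segStep (segs, run, cs) =
      (segs ++ bump run (segF cs road),
       (segR cs road).sum + (if cs = [] then run else 0), []) := by
  induction cs with
  | nil =>
      intro road segs run _
      rw [foldl_segStep_nil]
      simp [segF, segR, bump, add_comm]
  | cons c cs ih =>
      intro road segs run h
      have hm : c ∈ road := h.subset (by simp)
      obtain ⟨i, hi⟩ := Option.isSome_iff_exists.mp ((PySem.List.index?_isSome_iff road c).mpr hm)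
      have hs := sublist_drop_of_index? h hi
      obtain ⟨pre, suf, rfl, hlen, hc⟩ := (PySem.List.index?_eq_some_iff _ _ _).mp hi
      have hdrop : (pre ++ c :: suf).drop (i + 1) = suf := by
        rw [List.drop_append]; simp [hlen]
      have htake : (pre ++ c :: suf).take (i + 1) = pre ++ [c] := by
        rw [List.take_append]; simp [hlen]
      have hsplit : pre ++ c :: suf = (pre ++ [c]) ++ suf := by simp
      rw [hsplit, List.foldl_append, List.foldl_append,
        foldl_segStep_pre c cs pre segs run (fun x hx => fun he => hc (he ▸ hx))]
      simp only [List.foldl_cons, List.foldl_nil, segStep, if_true]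
      rw [ih suf _ 0 (hdrop ▸ hs), bump_zero]
      have hj : List.idxOf? c (pre ++ c :: suf) = some i := by
        rw [← PySem.List.index?_eq_idxOf?]; exact hi
      simp [segF, segR, hj, hdrop, htake, bump, add_assoc]

-- ===== VERDICT =====
theorem maxCnt_spec : Claim_equal_maxCnt := by
  intro road1 road2 _ hpre
  unfold Pre_maxCnt at hpre
  obtain ⟨h1, h2⟩ := hpre
  unfold Spec_maxCnt maxCnt maxCnt_alt segments
  dsimp only
  rw [goA_eq _ _ _ _ _ h1 h2,
      foldl_segStep_eq _ _ _ _ h1, foldl_segStep_eq _ _ _ _ h2, bump_zero, bump_zero]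
  simp only [List.nil_append]
  rw [PySem.List.foldl_add _ (fun p : Int × Int => max p.1 p.2)]
  rw [show (fun p : Int × Int => max p.1 p.2) = Function.uncurry max from rfl,
      List.map_uncurry_zip_eq_zipWith]
  split_ifs <;> simp [add_comm]
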